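-- pv_equiv track=rewrite | github.com/extra-p/extrap | extrap/gui/TreeModel.py | remove_method_parameters
-- ===== SOURCE A (Python) =====
-- def remove_method_parameters(name):
--     def _replace_braces(name, lb, rb):
--         depth = 0
--         start = -1
--         replacement = lb + '…' + rb
--         i = 0
--         while i < len(name):
--             elem = name[i]
--             if elem == lb:
--                 depth += 1
--                 if start == -1:
--                     start = i
--             elif elem == rb:
--                 depth -= 1
--                 if start != -1 and depth == 0:
--                     if start + 1 != i:
--                         name = name[0:start:] + replacement + name[i + 1:len(name):]
--                         i = start + len(replacement) - 1
--                     start = -1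
--             i += 1
--         return name
--
--     name = _replace_braces(name, '<', '>')
--     name = _replace_braces(name, '(', ')')
--     return name
-- ===== SOURCE B (Python) =====
-- def remove_method_parameters(name):
--     for lb, rb in (('<', '>'), ('(', ')')):
--         out = []
--         depth = 0
--         mark = None  # index in out where the pending top-level group starts
--         for ch in name:
--             if ch == lb:
--                 depth += 1
--                 if mark is None:
--                     mark = len(out)
--                 out.append(ch)
--             elif ch == rb:
--                 depth -= 1
--                 out.append(ch)
--                 if mark is not None and depth == 0:
--                     if len(out) - mark > 2:
--                         del out[mark:]
--                         out.extend((lb, '…', rb))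
--                     mark = None
--             else:
--                 out.append(ch)
--         name = ''.join(out)
--     return name
-- ===== Notes on version B (the rewrite author's own statement) =====
-- stated objective: faster
-- what changed: Replaces A's splice-and-rescan (rebuilding the whole string and resetting the index each time a group closes) with a single left-to-right pass over the input that appends to an output buffer and truncates it to the group's opener when a non-empty top-level group closes.
import Mathlib
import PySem

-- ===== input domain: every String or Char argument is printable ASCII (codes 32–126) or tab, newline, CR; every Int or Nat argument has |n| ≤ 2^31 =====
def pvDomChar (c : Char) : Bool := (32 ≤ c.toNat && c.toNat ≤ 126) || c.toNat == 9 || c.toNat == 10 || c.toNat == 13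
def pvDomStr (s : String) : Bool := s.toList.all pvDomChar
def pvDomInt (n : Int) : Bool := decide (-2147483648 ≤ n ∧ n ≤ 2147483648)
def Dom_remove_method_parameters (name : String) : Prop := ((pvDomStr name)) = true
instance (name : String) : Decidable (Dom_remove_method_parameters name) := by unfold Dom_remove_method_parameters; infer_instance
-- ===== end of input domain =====

-- B is a single left-to-right pass with an output buffer (emit '…' when a top-level group
-- closes) instead of A's splice-and-rescan on the string; return value proved equal.

-- ===== PORT A =====
-- A's inner while-loop `_replace_braces`: fuel counts the remaining loop iterations
-- (each iteration advances past exactly one character of the original string, so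
-- `name.length` iterations suffice; the fuel guard only makes the loop total).
def pvA_loop (lb rb : Char) (fuel : Nat) (name : List Char) (depth start : Int) (i : Nat) : List Char :=
  match fuel with
  | 0 => name
  | fuel + 1 =>
    if h : i < name.length then
      let elem := name[i]
      if elem = lb then
        pvA_loop lb rb fuel name (depth + 1) (if start = -1 then (i : Int) else start) (i + 1)
      else if elem = rb then
        let depth' := depth - 1
        if start ≠ -1 ∧ depth' = 0 then
          if start + 1 ≠ (i : Int) then
            -- name[0:start:] + replacement + name[i+1:len(name):]
            let name' := PySem.List.slice name (some 0) (some start) ++ [lb, '…', rb] ++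
                         PySem.List.slice name (some ((i : Int) + 1)) (some (name.length : Int))
            -- i = start + len(replacement) - 1, then i += 1; start ≥ 0 here (it was set to
            -- an earlier loop index), so Int.toNat is exact
            pvA_loop lb rb fuel name' depth' (-1) (start.toNat + 3)
          else
            pvA_loop lb rb fuel name depth' (-1) (i + 1)
        else
          pvA_loop lb rb fuel name depth' start (i + 1)
      else
        pvA_loop lb rb fuel name depth start (i + 1)
    else name

def remove_method_parameters (name : String) : String :=
  let n1 := pvA_loop '<' '>' name.toList.length name.toList 0 (-1) 0
  String.ofList (pvA_loop '(' ')' n1.length n1 0 (-1) 0)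

-- ===== PORT B =====
-- one pass: out = output buffer, depth = brace depth, mark = index in out of the
-- pending top-level opener (None = no open top-level group)
def pvB_loop (lb rb : Char) (out : List Char) (depth : Int) (mark : Option Nat) :
    List Char → List Char
  | [] => out
  | ch :: rest =>
    if ch = lb then
      pvB_loop lb rb (out ++ [ch]) (depth + 1) (some (mark.getD out.length)) rest
    else if ch = rb then
      let depth' := depth - 1
      let out' := out ++ [ch]
      -- Python: `if mark is not None and depth == 0:`; inside that branch mark ≠ none,
      -- so `mark.getD 0` is exactly the mark value
      if mark ≠ none ∧ depth' = 0 then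
        pvB_loop lb rb
          (if out'.length - mark.getD 0 > 2 then out'.take (mark.getD 0) ++ [lb, '…', rb] else out')
          depth' none rest
      else
        pvB_loop lb rb out' depth' mark rest
    else
      pvB_loop lb rb (out ++ [ch]) depth mark rest

def remove_method_parameters_alt (name : String) : String :=
  let n1 := pvB_loop '<' '>' [] 0 none name.toList
  String.ofList (pvB_loop '(' ')' [] 0 none n1)

-- ===== PRECONDITION & SPEC =====
def Spec_remove_method_parameters (name : String) (out : String) : Prop := out = remove_method_parameters_alt name
instance (name : String) (out : String) : Decidable (Spec_remove_method_parameters name out) := by unfold Spec_remove_method_parameters; infer_instance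

-- ===== CLAIM (what is proved, stated in full; the proofs are below) =====
def Claim_equal_remove_method_parameters : Prop := ∀ (name : String), Dom_remove_method_parameters name → Spec_remove_method_parameters name (remove_method_parameters name)

-- ===== LEMMAS AND PROOFS =====

-- encode B's mark as A's start value
def pvEnc : Option Nat → Int
  | none => -1
  | some m => m

theorem pvA_eq_pvB (lb rb : Char) (rest : List Char) :
    ∀ (out : List Char) (depth : Int) (m : Option Nat),
      (∀ k, m = some k → k < out.length) →
      pvA_loop lb rb rest.length (out ++ rest) depth (pvEnc m) out.length
        = pvB_loop lb rb out depth m rest := by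
  induction rest with
  | nil => intro out depth m _; simp [pvA_loop, pvB_loop]
  | cons ch rest ih =>
    intro out depth m hm
    have hi : out.length < (out ++ ch :: rest).length := by simp
    have helem : (out ++ ch :: rest)[out.length]'hi = ch := by
      simp [List.getElem_append_right]
    rw [pvB_loop]
    simp only [List.length_cons]
    rw [pvA_loop]
    simp only [dif_pos hi, helem]
    by_cases hlb : ch = lb
    · -- opener
      have hstart : (if pvEnc m = -1 then ((out.length : Nat) : Int) else pvEnc m)
          = pvEnc (some (m.getD out.length)) := by
        cases m with
        | none => simp [pvEnc]
        | some k =>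
          simp only [pvEnc, Option.getD_some]
          rw [if_neg (by omega : ¬((k : Int) = -1))]
      have hinv : ∀ k', some (m.getD out.length) = some k' → k' < (out ++ [ch]).length := by
        intro k' hk'
        cases m with
        | none => simp_all
        | some k => have := hm k rfl; simp_all; omega
      simp only [if_pos hlb, hstart]
      have := ih (out ++ [ch]) (depth + 1) (some (m.getD out.length)) hinv
      simpa using this
    · simp only [if_neg hlb]
      by_cases hrb : ch = rb
      · -- closer
        simp only [if_pos hrb]
        cases m with
        | none =>
          rw [if_neg (by simp [pvEnc]), if_neg (by simp)]
          have := ih (out ++ [ch]) (depth - 1) none (by simp)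
          simpa using this
        | some k =>
          have hk : k < out.length := hm k rfl
          by_cases hd : depth - 1 = 0
          · rw [if_pos ⟨by simp only [pvEnc]; omega, hd⟩]
            rw [if_pos (show ((some k ≠ none) ∧ depth - 1 = 0) from ⟨by simp, hd⟩)]
            simp only [Option.getD_some]
            by_cases hne : pvEnc (some k) + 1 ≠ ((out.length : Nat) : Int)
            · -- non-empty top-level group: collapse it
              rw [if_pos hne]
              have hx : (out ++ [ch]).length - k > 2 := by
                simp only [pvEnc] at hne
                simp only [List.length_append, List.length_cons, List.length_nil]
                omega
              rw [if_pos hx]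
              have e1 : PySem.List.slice (out ++ ch :: rest) (some 0) (some (pvEnc (some k)))
                  = out.take k := by
                simp only [pvEnc]
                rw [PySem.List.slice_zero_start, PySem.List.slice_to_natCast]
                exact List.take_append_of_le_length hk.le
              have e2 : PySem.List.slice (out ++ ch :: rest) (some (((out.length : Nat) : Int) + 1))
                  (some (((out ++ ch :: rest).length : Nat) : Int)) = rest := by
                have hc : ((out.length : Nat) : Int) + 1 = (((out.length + 1 : Nat)) : Int) := by
                  push_cast; ring
                rw [hc, PySem.List.slice_natCast]
                rw [show out ++ ch :: rest = (out ++ [ch]) ++ rest by simp]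
                rw [show out.length + 1 = (out ++ [ch]).length by simp]
                rw [List.drop_left]
                simp
                omega
              rw [e1, e2]
              have etake : (out ++ [ch]).take k = out.take k :=
                List.take_append_of_le_length hk.le
              rw [etake]
              have hlen : (pvEnc (some k)).toNat + 3 = (out.take k ++ [lb, '…', rb]).length := by
                simp [pvEnc, Int.toNat_natCast, List.length_take, Nat.min_eq_left hk.le]
              rw [hlen]
              have := ih (out.take k ++ [lb, '…', rb]) (depth - 1) none (by simp)
              simpa using this
            · -- empty group: no collapse
              rw [if_neg hne]
              have hx : ¬ ((out ++ [ch]).length - k > 2) := by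
                simp only [pvEnc] at hne
                simp only [List.length_append, List.length_cons, List.length_nil]
                omega
              rw [if_neg hx]
              have := ih (out ++ [ch]) (depth - 1) none (by simp)
              simpa using this
          · rw [if_neg (fun h : pvEnc (some k) ≠ -1 ∧ depth - 1 = 0 => hd h.2)]
            rw [if_neg (fun h : (some k ≠ none) ∧ depth - 1 = 0 => hd h.2)]
            have := ih (out ++ [ch]) (depth - 1) (some k) (by intro k' hk'; simp_all; omega)
            simpa using this
      · -- ordinary character
        simp only [if_neg hrb]
        have := ih (out ++ [ch]) depth m (by intro k hk; have := hm k hk; simp; omega)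
        simpa using this

theorem pvA_pass_eq (lb rb : Char) (cs : List Char) :
    pvA_loop lb rb cs.length cs 0 (-1) 0 = pvB_loop lb rb [] 0 none cs := by
  have := pvA_eq_pvB lb rb cs [] 0 none (by simp)
  simpa [pvEnc] using this

-- ===== VERDICT (by name: the statement is the Claim_ definition above) =====
theorem remove_method_parameters_spec : Claim_equal_remove_method_parameters := by
  intro name _
  unfold Spec_remove_method_parameters remove_method_parameters remove_method_parameters_alt
  simp only [pvA_pass_eq]
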